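-- pv_equiv track=rewrite | github.com/mittuled/skill-os | agents/sales-development-rep/company-researcher/scripts/generate.py | assess_buying_triggers
-- ===== SOURCE A (Python) =====
-- TRIGGER_URGENCY = {
--     "immediate": "Active buying signal — initiate outreach within 1 week",
--     "near_term": "Likely buying window in 1-3 months — prepare and monitor",
--     "long_term": "Potential future need in 3-12 months — add to nurture",
-- }
--
-- def assess_buying_triggers(triggers: list[dict]) -> list[dict]:
--     assessed = []
--     for t in triggers:
--         urgency = t.get("urgency", "long_term")
--         assessed.append({
--             "trigger": t.get("description", ""),
--             "urgency": urgency,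
--             "urgency_label": TRIGGER_URGENCY.get(urgency, "Unknown"),
--             "evidence": t.get("evidence", ""),
--         })
--     assessed.sort(key=lambda x: ["immediate", "near_term", "long_term"].index(x["urgency"]) if x["urgency"] in ["immediate", "near_term", "long_term"] else 3)
--     return assessed
-- ===== SOURCE B (Python) =====
-- TRIGGER_URGENCY = {
--     "immediate": "Active buying signal — initiate outreach within 1 week",
--     "near_term": "Likely buying window in 1-3 months — prepare and monitor",
--     "long_term": "Potential future need in 3-12 months — add to nurture",
-- }
--
-- def assess_buying_triggers(triggers: list[dict]) -> list[dict]: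
--     # single-pass stable bucket partition instead of mapping then comparison-sorting
--     immediate, near_term, long_term, other = [], [], [], []
--     for t in triggers:
--         urgency = t.get("urgency", "long_term")
--         item = {
--             "trigger": t.get("description", ""),
--             "urgency": urgency,
--             "urgency_label": TRIGGER_URGENCY.get(urgency, "Unknown"),
--             "evidence": t.get("evidence", ""),
--         }
--         if urgency == "immediate":
--             immediate.append(item)
--         elif urgency == "near_term":
--             near_term.append(item)
--         elif urgency == "long_term":
--             long_term.append(item)
--         else:
--             other.append(item)
--     return immediate + near_term + long_term + other
-- ===== Notes on version B (the rewrite author's own statement) =====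
-- stated objective: alternative
-- what changed: Replaces map-then-stable-comparison-sort (key = list.index over the urgency order) by a single-pass stable partition into four ordered buckets concatenated at the end.
import Mathlib
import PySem

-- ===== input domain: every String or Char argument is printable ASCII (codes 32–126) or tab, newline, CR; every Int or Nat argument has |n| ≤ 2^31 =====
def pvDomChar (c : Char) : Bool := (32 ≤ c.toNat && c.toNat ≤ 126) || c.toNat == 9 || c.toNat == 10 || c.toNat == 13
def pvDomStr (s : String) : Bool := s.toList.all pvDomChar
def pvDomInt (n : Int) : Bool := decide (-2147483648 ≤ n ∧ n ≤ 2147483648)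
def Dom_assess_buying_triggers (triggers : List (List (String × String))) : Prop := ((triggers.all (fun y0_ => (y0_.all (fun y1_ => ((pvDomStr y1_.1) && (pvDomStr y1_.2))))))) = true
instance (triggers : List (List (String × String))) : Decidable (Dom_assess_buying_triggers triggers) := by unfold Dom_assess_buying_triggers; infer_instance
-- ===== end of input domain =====

-- B replaces A's map-then-stable-sort (key = list.index over the urgency order) by a single
-- pass that appends each mapped item to one of four ordered buckets and concatenates them.

-- module constant shared by both Pythons
def TRIGGER_URGENCY : PySem.Dict String String := PySem.Dict.mk
  [("immediate", "Active buying signal — initiate outreach within 1 week"),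
   ("near_term", "Likely buying window in 1-3 months — prepare and monitor"),
   ("long_term", "Potential future need in 3-12 months — add to nurture")]

-- the mapped dict both Pythons build literally, field for field
def pvItem (t : List (String × String)) : List (String × String) :=
  let urgency := PySem.Dict.getD ⟨t⟩ "urgency" "long_term"
  [("trigger", PySem.Dict.getD ⟨t⟩ "description" ""),
   ("urgency", urgency),
   ("urgency_label", PySem.Dict.getD TRIGGER_URGENCY urgency "Unknown"),
   ("evidence", PySem.Dict.getD ⟨t⟩ "evidence" "")]

-- ===== PORT A =====
-- A's sort key: ["immediate","near_term","long_term"].index(x["urgency"]) if x["urgency"] in [...] else 3.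
-- x["urgency"] is always present on the mapped items A sorts, so getD's default is never used.
def pvKeyA (x : List (String × String)) : Nat :=
  let u := PySem.Dict.getD ⟨x⟩ "urgency" ""
  if u ∈ (["immediate", "near_term", "long_term"] : List String)
  then (PySem.List.index? ["immediate", "near_term", "long_term"] u).getD 3
  else 3

def assess_buying_triggers (triggers : List (List (String × String))) : List (List (String × String)) :=
  let assessed := triggers.foldl (fun acc t => acc ++ [pvItem t]) []
  PySem.List.sorted assessed pvKeyA false

-- ===== PORT B =====
def pvStepB (b : List (List (String × String)) × List (List (String × String)) ×
                 List (List (String × String)) × List (List (String × String)))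
    (t : List (String × String)) :
    List (List (String × String)) × List (List (String × String)) ×
    List (List (String × String)) × List (List (String × String)) :=
  let urgency := PySem.Dict.getD ⟨t⟩ "urgency" "long_term"
  let item := pvItem t
  if urgency = "immediate" then (b.1 ++ [item], b.2.1, b.2.2.1, b.2.2.2)
  else if urgency = "near_term" then (b.1, b.2.1 ++ [item], b.2.2.1, b.2.2.2)
  else if urgency = "long_term" then (b.1, b.2.1, b.2.2.1 ++ [item], b.2.2.2)
  else (b.1, b.2.1, b.2.2.1, b.2.2.2 ++ [item])

def assess_buying_triggers_alt (triggers : List (List (String × String))) : List (List (String × String)) :=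
  let b := triggers.foldl pvStepB ([], [], [], [])
  b.1 ++ b.2.1 ++ b.2.2.1 ++ b.2.2.2

-- ===== PRECONDITION & SPEC =====
def Spec_assess_buying_triggers (triggers : List (List (String × String))) (out : List (List (String × String))) : Prop := out = assess_buying_triggers_alt triggers
instance (triggers : List (List (String × String))) (out : List (List (String × String))) : Decidable (Spec_assess_buying_triggers triggers out) := by unfold Spec_assess_buying_triggers; infer_instance

-- ===== CLAIM (what is proved, stated in full; the proofs are below) =====
def Claim_equal_assess_buying_triggers : Prop := ∀ (triggers : List (List (String × String))), Dom_assess_buying_triggers triggers → Spec_assess_buying_triggers triggers (assess_buying_triggers triggers)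

-- ===== LEMMAS AND PROOFS =====

-- the mapped item carries exactly the urgency the original dict yields
lemma item_urgency (t : List (String × String)) :
    PySem.Dict.getD ⟨pvItem t⟩ "urgency" "" = PySem.Dict.getD ⟨t⟩ "urgency" "long_term" := by
  simp [pvItem, PySem.Dict.getD, PySem.Dict.get?]

-- A's key on a mapped item, case by case on the urgency the original dict yields
lemma pvKeyA_pvItem (t : List (String × String)) :
    pvKeyA (pvItem t) =
      (if PySem.Dict.getD ⟨t⟩ "urgency" "long_term" = "immediate" then 0
       else if PySem.Dict.getD ⟨t⟩ "urgency" "long_term" = "near_term" then 1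
       else if PySem.Dict.getD ⟨t⟩ "urgency" "long_term" = "long_term" then 2
       else 3) := by
  unfold pvKeyA
  rw [item_urgency]
  by_cases h1 : PySem.Dict.getD ⟨t⟩ "urgency" "long_term" = "immediate"
  · rw [h1]; decide
  · by_cases h2 : PySem.Dict.getD ⟨t⟩ "urgency" "long_term" = "near_term"
    · rw [h2]; decide
    · by_cases h3 : PySem.Dict.getD ⟨t⟩ "urgency" "long_term" = "long_term"
      · rw [h3]; decide
      · simp [h1, h2, h3]

lemma pvKeyA_pvItem_le (t : List (String × String)) : pvKeyA (pvItem t) ≤ 3 := by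
  rw [pvKeyA_pvItem]; split_ifs <;> omega

-- stable insertion position: skip everything not-before, insert in front of the rest
lemma insertBy_split {α : Type} (before : α → α → Bool) (x : α) (l1 l2 : List α)
    (h1 : ∀ y ∈ l1, before x y = false) (h2 : ∀ y ∈ l2, before x y = true) :
    PySem.List.insertBy before x (l1 ++ l2) = l1 ++ x :: l2 := by
  induction l1 with
  | nil =>
    cases l2 with
    | nil => rfl
    | cons y ys => simp [PySem.List.insertBy, h2 y (by simp)]
  | cons y ys ih =>
    have hy : before x y = false := h1 y (by simp)
    simp only [List.cons_append, PySem.List.insertBy, hy]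
    simp only [Bool.false_eq_true, if_false, List.cons.injEq, true_and]
    exact ih (fun z hz => h1 z (by simp [hz]))

-- inserting an item of key j into a bucket-partitioned list appends it to bucket j
lemma insert_bucket (x : List (String × String))
    (b0 b1 b2 b3 : List (List (String × String)))
    (h0 : ∀ m ∈ b0, pvKeyA m = 0) (h1 : ∀ m ∈ b1, pvKeyA m = 1)
    (h2 : ∀ m ∈ b2, pvKeyA m = 2) (h3 : ∀ m ∈ b3, pvKeyA m = 3) :
    PySem.List.insertBy (fun a b => decide (pvKeyA a < pvKeyA b)) x (b0 ++ b1 ++ b2 ++ b3) =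
      (if pvKeyA x = 0 then (b0 ++ [x]) ++ b1 ++ b2 ++ b3
       else if pvKeyA x = 1 then b0 ++ (b1 ++ [x]) ++ b2 ++ b3
       else if pvKeyA x = 2 then b0 ++ b1 ++ (b2 ++ [x]) ++ b3
       else b0 ++ b1 ++ b2 ++ (b3 ++ [x])) := by
  by_cases c0 : pvKeyA x = 0
  · rw [if_pos c0]
    have h := insertBy_split (fun a b => decide (pvKeyA a < pvKeyA b)) x
      b0 (b1 ++ b2 ++ b3)
      (fun y hy => by simp only [h0 y hy, c0, decide_eq_false_iff_not]; omega)
      (fun y hy => by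
        simp only [List.append_assoc, List.mem_append] at hy
        rcases hy with hy | hy | hy
        · simp only [h1 y hy, c0, decide_eq_true_eq]; omega
        · simp only [h2 y hy, c0, decide_eq_true_eq]; omega
        · simp only [h3 y hy, c0, decide_eq_true_eq]; omega)
    simpa [List.append_assoc] using h
  · by_cases c1 : pvKeyA x = 1
    · rw [if_neg c0, if_pos c1]
      have h := insertBy_split (fun a b => decide (pvKeyA a < pvKeyA b)) x
        (b0 ++ b1) (b2 ++ b3)
        (fun y hy => by
          rcases List.mem_append.mp hy with hy | hy
          · simp only [h0 y hy, c1, decide_eq_false_iff_not]; omega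
          · simp only [h1 y hy, c1, decide_eq_false_iff_not]; omega)
        (fun y hy => by
          rcases List.mem_append.mp hy with hy | hy
          · simp only [h2 y hy, c1, decide_eq_true_eq]; omega
          · simp only [h3 y hy, c1, decide_eq_true_eq]; omega)
      simpa [List.append_assoc] using h
    · by_cases c2 : pvKeyA x = 2
      · rw [if_neg c0, if_neg c1, if_pos c2]
        have h := insertBy_split (fun a b => decide (pvKeyA a < pvKeyA b)) x
          (b0 ++ b1 ++ b2) b3
          (fun y hy => by
            simp only [List.append_assoc, List.mem_append] at hy
            rcases hy with hy | hy | hy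
            · simp only [h0 y hy, c2, decide_eq_false_iff_not]; omega
            · simp only [h1 y hy, c2, decide_eq_false_iff_not]; omega
            · simp only [h2 y hy, c2, decide_eq_false_iff_not]; omega)
          (fun y hy => by simp only [h3 y hy, c2, decide_eq_true_eq]; omega)
        simpa [List.append_assoc] using h
      · rw [if_neg c0, if_neg c1, if_neg c2]
        have h := insertBy_split (fun a b => decide (pvKeyA a < pvKeyA b)) x
          (b0 ++ b1 ++ b2 ++ b3) []
          (fun y hy => by
            simp only [List.append_assoc, List.mem_append] at hy
            rcases hy with hy | hy | hy | hy
            · simp only [h0 y hy, decide_eq_false_iff_not]; omega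
            · simp only [h1 y hy, decide_eq_false_iff_not]; omega
            · simp only [h2 y hy, decide_eq_false_iff_not]; omega
            · simp only [h3 y hy, decide_eq_false_iff_not]; omega)
          (fun y hy => by simp at hy)
        simp only [List.append_nil] at h
        simpa [List.append_assoc] using h

-- B's step, phrased through A's key on the mapped item
lemma pvStepB_key (b0 b1 b2 b3 : List (List (String × String))) (t : List (String × String)) :
    pvStepB (b0, b1, b2, b3) t =
      (if pvKeyA (pvItem t) = 0 then (b0 ++ [pvItem t], b1, b2, b3)
       else if pvKeyA (pvItem t) = 1 then (b0, b1 ++ [pvItem t], b2, b3)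
       else if pvKeyA (pvItem t) = 2 then (b0, b1, b2 ++ [pvItem t], b3)
       else (b0, b1, b2, b3 ++ [pvItem t])) := by
  rw [pvKeyA_pvItem]
  by_cases h1 : PySem.Dict.getD ⟨t⟩ "urgency" "long_term" = "immediate"
  · simp [pvStepB, h1]
  · by_cases h2 : PySem.Dict.getD ⟨t⟩ "urgency" "long_term" = "near_term"
    · simp [pvStepB, h2]
    · by_cases h3 : PySem.Dict.getD ⟨t⟩ "urgency" "long_term" = "long_term"
      · simp [pvStepB, h3]
      · simp [pvStepB, h1, h2, h3]

-- the fold invariant: A's insertion fold over mapped items tracks B's bucket fold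
lemma loop_inv (ts : List (List (String × String)))
    (b0 b1 b2 b3 : List (List (String × String)))
    (h0 : ∀ m ∈ b0, pvKeyA m = 0) (h1 : ∀ m ∈ b1, pvKeyA m = 1)
    (h2 : ∀ m ∈ b2, pvKeyA m = 2) (h3 : ∀ m ∈ b3, pvKeyA m = 3) :
    ts.foldl (fun acc t => PySem.List.insertBy
        (fun a b => decide (pvKeyA a < pvKeyA b)) (pvItem t) acc) (b0 ++ b1 ++ b2 ++ b3) =
      (let b := ts.foldl pvStepB (b0, b1, b2, b3)
       b.1 ++ b.2.1 ++ b.2.2.1 ++ b.2.2.2) := by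
  induction ts generalizing b0 b1 b2 b3 with
  | nil => simp
  | cons t ts ih =>
    simp only [List.foldl_cons]
    rw [insert_bucket (pvItem t) b0 b1 b2 b3 h0 h1 h2 h3, pvStepB_key]
    have hle := pvKeyA_pvItem_le t
    by_cases c0 : pvKeyA (pvItem t) = 0
    · rw [if_pos c0, if_pos c0]
      exact ih (b0 ++ [pvItem t]) b1 b2 b3
        (fun m hm => by rcases List.mem_append.mp hm with hm | hm
                        · exact h0 m hm
                        · simp at hm; subst hm; exact c0) h1 h2 h3
    · by_cases c1 : pvKeyA (pvItem t) = 1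
      · rw [if_neg c0, if_neg c0, if_pos c1, if_pos c1]
        exact ih b0 (b1 ++ [pvItem t]) b2 b3 h0
          (fun m hm => by rcases List.mem_append.mp hm with hm | hm
                          · exact h1 m hm
                          · simp at hm; subst hm; exact c1) h2 h3
      · by_cases c2 : pvKeyA (pvItem t) = 2
        · rw [if_neg c0, if_neg c0, if_neg c1, if_neg c1, if_pos c2, if_pos c2]
          exact ih b0 b1 (b2 ++ [pvItem t]) b3 h0 h1
            (fun m hm => by rcases List.mem_append.mp hm with hm | hm
                            · exact h2 m hm
                            · simp at hm; subst hm; exact c2) h3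
        · have c3 : pvKeyA (pvItem t) = 3 := by omega
          rw [if_neg c0, if_neg c0, if_neg c1, if_neg c1, if_neg c2, if_neg c2]
          exact ih b0 b1 b2 (b3 ++ [pvItem t]) h0 h1 h2
            (fun m hm => by rcases List.mem_append.mp hm with hm | hm
                            · exact h3 m hm
                            · simp at hm; subst hm; exact c3)

-- ===== VERDICT (by name: the statement is the Claim_ definition above) =====
theorem assess_buying_triggers_spec : Claim_equal_assess_buying_triggers := by
  intro triggers _
  show assess_buying_triggers triggers = assess_buying_triggers_alt triggers
  unfold assess_buying_triggers assess_buying_triggers_alt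
  rw [PySem.List.foldl_append_singleton_eq_map, List.nil_append,
      PySem.List.sorted_eq_foldl_insertBy, List.foldl_map]
  simpa using loop_inv triggers [] [] [] []
    (by simp) (by simp) (by simp) (by simp)
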